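-- pv_equiv track=rewrite | github.com/Hakari-Bibani/WiseGrade | grades/grade4.py | check_code_quality
-- ===== SOURCE A (Python) =====
-- from typing import Tuple, Dict
--
-- def check_code_quality(code_input: str) -> Tuple[int, Dict[str, int]]:
--     """
--     Evaluate code quality based on naming, spacing, comments, and organization
--     """
--     points = 0
--     breakdown = {}
--
--     # Variable naming (5 points)
--     poor_names = ['x', 'y', 'a', 'b', 'foo', 'bar']
--     has_poor_names = any(f" {name} " in f" {code_input} " for name in poor_names)
--     if not has_poor_names:
--         points += 5
--         breakdown['Variable Naming'] = 5
--     else: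
--         breakdown['Variable Naming'] = 0
--
--     # Spacing (5 points)
--     poor_spacing = ['=+', '=-', '=*', '=/', '><', '<>', '==+', '==-']
--     has_poor_spacing = any(pattern in code_input for pattern in poor_spacing)
--     if not has_poor_spacing:
--         points += 5
--         breakdown['Spacing'] = 5
--     else:
--         breakdown['Spacing'] = 0
--
--     # Comments (5 points)
--     if '#' in code_input and code_input.count('#') >= 3:
--         points += 5
--         breakdown['Comments'] = 5
--     else:
--         breakdown['Comments'] = 0
--
--     # Code organization (5 points)
--     if code_input.count('\n\n') >= 2:
--         points += 5
--         breakdown['Code Organization'] = 5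
--     else:
--         breakdown['Code Organization'] = 0
--
--     return points, breakdown
-- ===== SOURCE B (Python) =====
-- def _poor_token_found(code):
--     # scan the space-delimited tokens directly instead of substring-searching " name "
--     poor = {'x', 'y', 'a', 'b', 'foo', 'bar'}
--     found = False
--     tok = ''
--     for ch in code:
--         if ch == ' ':
--             if tok in poor:
--                 found = True
--             tok = ''
--         else:
--             tok = tok + ch
--     return found or tok in poor
--
-- def _bad_pair_found(code):
--     # every poor-spacing pattern contains one of these six adjacent pairs, so scan pairs once
--     bad = {'=+', '=-', '=*', '=/', '><', '<>'}
--     found = False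
--     prev = None
--     for ch in code:
--         if prev is not None and prev + ch in bad:
--             found = True
--         prev = ch
--     return found
--
-- def _hash_count(code):
--     n = 0
--     for ch in code:
--         if ch == '#':
--             n += 1
--     return n
--
-- def _blank_sep_count(code):
--     # count('\n\n') = sum over maximal newline runs of len(run)//2
--     total = 0
--     run = 0
--     for ch in code:
--         if ch == '\n':
--             run += 1
--         else:
--             total += run // 2
--             run = 0
--     return total + run // 2
--
-- def check_code_quality(code_input):
--     results = [
--         ("Variable Naming", not _poor_token_found(code_input)),
--         ("Spacing", not _bad_pair_found(code_input)),
--         ("Comments", _hash_count(code_input) >= 3),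
--         ("Code Organization", _blank_sep_count(code_input) >= 2),
--     ]
--     breakdown = {label: (5 if ok else 0) for label, ok in results}
--     return 5 * sum(ok for _, ok in results), breakdown
-- ===== Notes on version B (the rewrite author's own statement) =====
-- stated objective: alternative
-- what changed: Replaced A's substring searches (padded poor-name patterns, eight spacing patterns, str.count for comments and blank lines) with single character-level scans: a space tokenizer checking each token against the poor-name set, an adjacent-pair scan over the six two-character pairs that every poor-spacing pattern contains, a direct comment-character count, and newline run-length arithmetic (each maximal run of k newlines contributes k//2) for the blank-line separator count.
import Mathlib
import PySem

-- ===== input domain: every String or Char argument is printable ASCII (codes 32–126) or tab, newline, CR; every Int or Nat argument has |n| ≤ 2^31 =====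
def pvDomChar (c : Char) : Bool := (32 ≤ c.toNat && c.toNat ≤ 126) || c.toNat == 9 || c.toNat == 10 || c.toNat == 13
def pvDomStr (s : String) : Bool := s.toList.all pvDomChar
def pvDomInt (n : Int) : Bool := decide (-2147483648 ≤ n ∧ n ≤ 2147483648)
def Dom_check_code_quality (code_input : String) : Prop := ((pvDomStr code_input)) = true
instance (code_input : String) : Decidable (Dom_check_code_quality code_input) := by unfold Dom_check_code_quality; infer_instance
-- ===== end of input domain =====

-- B replaces A's substring searches (" name " in padded string, 8 spacing patterns, str.count)
-- with single character-level scans: a space tokenizer, an adjacent-pair scan, a '#' char count,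
-- and newline run-length arithmetic; objective: alternative (same O(n) cost, different algorithm).

-- ===== PORT A =====
def check_code_quality (code_input : String) : Int × (List (String × Int)) :=
  let points : Int := 0
  let breakdown : PySem.Dict String Int := PySem.Dict.empty
  let poor_names : List String := ["x", "y", "a", "b", "foo", "bar"]
  let has_poor_names := poor_names.any (fun name => PySem.Str.isIn (" " ++ name ++ " ") (" " ++ code_input ++ " "))
  let (points, breakdown) :=
    if !has_poor_names then (points + 5, breakdown.insert "Variable Naming" 5)
    else (points, breakdown.insert "Variable Naming" 0)
  let poor_spacing : List String := ["=+", "=-", "=*", "=/", "><", "<>", "==+", "==-"]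
  let has_poor_spacing := poor_spacing.any (fun pattern => PySem.Str.isIn pattern code_input)
  let (points, breakdown) :=
    if !has_poor_spacing then (points + 5, breakdown.insert "Spacing" 5)
    else (points, breakdown.insert "Spacing" 0)
  let (points, breakdown) :=
    if PySem.Str.isIn "#" code_input && decide (3 ≤ PySem.Str.count code_input "#") then
      (points + 5, breakdown.insert "Comments" 5)
    else (points, breakdown.insert "Comments" 0)
  let (points, breakdown) :=
    if decide (2 ≤ PySem.Str.count code_input "\n\n") then
      (points + 5, breakdown.insert "Code Organization" 5)
    else (points, breakdown.insert "Code Organization" 0)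
  (points, breakdown.items)

-- ===== PORT B ===== (transliteration of Source B; the Python str token is kept as a List Char)
def pvPoorTokens : List (List Char) := [['x'], ['y'], ['a'], ['b'], ['f','o','o'], ['b','a','r']]

-- Source B _poor_token_found: scan the space-delimited tokens directly
def pvPoorTokenFound (code : String) : Bool :=
  let r := code.toList.foldl
    (fun (st : Bool × List Char) ch =>
      if ch = ' ' then (st.1 || pvPoorTokens.contains st.2, [])
      else (st.1, st.2 ++ [ch]))
    (false, [])
  r.1 || pvPoorTokens.contains r.2

def pvBadPair (a b : Char) : Bool :=
  (a = '=' && b = '+') || (a = '=' && b = '-') || (a = '=' && b = '*') ||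
  (a = '=' && b = '/') || (a = '>' && b = '<') || (a = '<' && b = '>')

-- Source B _bad_pair_found: scan adjacent character pairs once
def pvBadPairFound (code : String) : Bool :=
  (code.toList.foldl
    (fun (st : Bool × Option Char) ch =>
      ((match st.2 with
        | some p => st.1 || pvBadPair p ch
        | none => st.1), some ch))
    (false, none)).1

-- Source B _hash_count
def pvHashCount (code : String) : Nat :=
  code.toList.foldl (fun n ch => if ch = '#' then n + 1 else n) 0

-- Source B _blank_sep_count: sum of run//2 over maximal newline runs
def pvBlankSepCount (code : String) : Nat :=
  let r := code.toList.foldl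
    (fun (st : Nat × Nat) ch =>
      if ch = '\n' then (st.1, st.2 + 1) else (st.1 + st.2 / 2, 0))
    (0, 0)
  r.1 + r.2 / 2

def check_code_quality_alt (code_input : String) : Int × (List (String × Int)) :=
  let results : List (String × Bool) :=
    [("Variable Naming", !pvPoorTokenFound code_input),
     ("Spacing", !pvBadPairFound code_input),
     ("Comments", decide (3 ≤ pvHashCount code_input)),
     ("Code Organization", decide (2 ≤ pvBlankSepCount code_input))]
  let breakdown := results.map (fun r => (r.1, if r.2 then (5 : Int) else 0))
  (5 * ((results.countP (fun r => r.2)) : Int), breakdown)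

-- ===== PRECONDITION & SPEC =====
def Spec_check_code_quality (code_input : String) (out : Int × (List (String × Int))) : Prop := out = check_code_quality_alt code_input
instance (code_input : String) (out : Int × (List (String × Int))) : Decidable (Spec_check_code_quality code_input out) := by unfold Spec_check_code_quality; infer_instance

-- ===== CLAIM (what is proved, stated in full; the proofs are below) =====
def Claim_equal_check_code_quality : Prop := ∀ (code_input : String), Dom_check_code_quality code_input → Spec_check_code_quality code_input (check_code_quality code_input)

-- ===== LEMMAS AND PROOFS =====

/- ---------- proof-side specification: splitting on ' ' (head token, remaining tokens) ---------- -/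
def pvHT : List Char → (List Char × List (List Char))
  | [] => ([], [])
  | c :: t =>
    let r := pvHT t
    if c = ' ' then ([], r.1 :: r.2) else (c :: r.1, r.2)

-- an occurrence of w in cs delimited by spaces / string ends
def pvOcc (cs w : List Char) : Prop :=
  ∃ l r, cs = l ++ w ++ r ∧ (l = [] ∨ ∃ l', l = l' ++ [' ']) ∧ (r = [] ∨ ∃ r', r = ' ' :: r')

theorem pvOcc_iff_infix (cs w : List Char) :
    (' ' :: w ++ [' ']) <:+: (' ' :: cs ++ [' ']) ↔ pvOcc cs w := by
  constructor
  · rintro ⟨x, y, hxy⟩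
    rcases x with _ | ⟨hx, x'⟩
    · simp only [List.nil_append, List.cons_append, List.cons.injEq] at hxy
      obtain ⟨-, h⟩ := hxy
      rcases y.eq_nil_or_concat with rfl | ⟨ys, a, rfl⟩
      · have h' : w = cs := by simpa using h
        exact ⟨[], [], by simp [h'], Or.inl rfl, Or.inl rfl⟩
      · have h' : (w ++ [' '] ++ ys) ++ [a] = cs ++ [' '] := by
          simpa [List.append_assoc] using h
        obtain ⟨h1, h2⟩ := List.append_inj' h' (by simp)
        exact ⟨[], ' ' :: ys, by simp [← h1, List.append_assoc], Or.inl rfl, Or.inr ⟨ys, rfl⟩⟩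
    · simp only [List.cons_append, List.cons.injEq] at hxy
      obtain ⟨rfl, h⟩ := hxy
      rcases y.eq_nil_or_concat with rfl | ⟨ys, a, rfl⟩
      · have h' : (x' ++ [' '] ++ w) ++ [' '] = cs ++ [' '] := by
          simpa [List.append_assoc] using h
        obtain ⟨h1, -⟩ := List.append_inj' h' (by simp)
        exact ⟨x' ++ [' '], [], by simp [← h1, List.append_assoc], Or.inr ⟨x', rfl⟩, Or.inl rfl⟩
      · have h' : (x' ++ [' '] ++ w ++ [' '] ++ ys) ++ [a] = cs ++ [' '] := by
          simpa [List.append_assoc] using h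
        obtain ⟨h1, -⟩ := List.append_inj' h' (by simp)
        exact ⟨x' ++ [' '], ' ' :: ys, by simp [← h1, List.append_assoc], Or.inr ⟨x', rfl⟩,
          Or.inr ⟨ys, rfl⟩⟩
  · rintro ⟨l, r, rfl, hl, hr⟩
    rcases hl with rfl | ⟨l', rfl⟩ <;>
      rcases hr with rfl | ⟨r', rfl⟩
    · exact ⟨[], [], by simp⟩
    · exact ⟨[], r' ++ [' '], by simp⟩
    · exact ⟨' ' :: l', [], by simp [List.append_assoc]⟩
    · exact ⟨' ' :: l', r' ++ [' '], by simp [List.append_assoc]⟩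

theorem pvHT_head_structure (cs : List Char) :
    ∃ r, cs = (pvHT cs).1 ++ r ∧ (r = [] ∨ ∃ r', r = ' ' :: r') := by
  induction cs with
  | nil => exact ⟨[], by simp [pvHT]⟩
  | cons c t ih =>
    by_cases hc : c = ' '
    · exact ⟨c :: t, by simp [pvHT, hc], Or.inr ⟨t, by rw [hc]⟩⟩
    · obtain ⟨r, hr, h2⟩ := ih
      exact ⟨r, by simp [pvHT, hc]; exact hr, h2⟩

theorem pvHT_tail_occ (cs w : List Char) (hw : w ∈ (pvHT cs).2) :
    ∃ l r, cs = (l ++ [' ']) ++ w ++ r ∧ (r = [] ∨ ∃ r', r = ' ' :: r') := by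
  induction cs with
  | nil => simp [pvHT] at hw
  | cons c t ih =>
    by_cases hc : c = ' '
    · subst hc
      rw [show pvHT (' ' :: t) = ([], (pvHT t).1 :: (pvHT t).2) from rfl] at hw
      rcases List.mem_cons.mp hw with rfl | hw'
      · obtain ⟨r, hr, h2⟩ := pvHT_head_structure t
        refine ⟨[], r, ?_, h2⟩
        conv_lhs => rw [hr]
        simp
      · obtain ⟨l, r, hlr, h2⟩ := ih hw'
        exact ⟨' ' :: l, r, by simp [hlr], h2⟩
    · rw [show pvHT (c :: t) = (c :: (pvHT t).1, (pvHT t).2) by simp [pvHT, hc]] at hw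
      simp only at hw
      obtain ⟨l, r, hlr, h2⟩ := ih hw
      exact ⟨c :: l, r, by simp [hlr], h2⟩

theorem pvHT_append_nospace (w z : List Char) (hw : ' ' ∉ w) :
    pvHT (w ++ z) = (w ++ (pvHT z).1, (pvHT z).2) := by
  induction w with
  | nil => simp
  | cons c t ih =>
    have hc : c ≠ ' ' := fun h => hw (h ▸ List.mem_cons_self)
    have ht : ' ' ∉ t := fun h => hw (List.mem_cons_of_mem _ h)
    simp [pvHT, hc, ih ht]

theorem pvHT_append_space (a b : List Char) :
    pvHT (a ++ ' ' :: b) = ((pvHT a).1, (pvHT a).2 ++ (pvHT b).1 :: (pvHT b).2) := by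
  induction a with
  | nil => simp [pvHT]
  | cons c t ih =>
    by_cases hc : c = ' ' <;> simp [pvHT, hc, ih]

theorem pvOcc_iff_token (cs w : List Char) (hw : w ≠ []) (hsp : ' ' ∉ w) :
    pvOcc cs w ↔ (w = (pvHT cs).1 ∨ w ∈ (pvHT cs).2) := by
  constructor
  · rintro ⟨l, r, rfl, hl, hr⟩
    have hW : pvHT w = (w, []) := by
      have := pvHT_append_nospace w [] hsp
      simpa [pvHT] using this
    have hWr : ∀ r, (r = [] ∨ ∃ r', r = ' ' :: r') → (pvHT (w ++ r)).1 = w := by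
      rintro r (rfl | ⟨r', rfl⟩)
      · simp [hW]
      · rw [pvHT_append_space w r', hW]
    rcases hl with rfl | ⟨l', rfl⟩
    · -- occurrence at the front: w is the head token
      left
      have := hWr r hr
      simpa using this.symm
    · -- occurrence after a space: w is among the remaining tokens
      right
      have hre : (l' ++ [' ']) ++ w ++ r = l' ++ ' ' :: (w ++ r) := by simp
      rw [hre, pvHT_append_space l' (w ++ r)]
      simp only
      rw [hWr r hr]
      exact List.mem_append_right _ List.mem_cons_self
  · rintro (hw1 | hw2)
    · obtain ⟨r, hr, h2⟩ := pvHT_head_structure cs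
      exact ⟨[], r, by simpa [← hw1] using hr, Or.inl rfl, h2⟩
    · obtain ⟨l, r, hlr, h2⟩ := pvHT_tail_occ cs w hw2
      exact ⟨l ++ [' '], r, hlr, Or.inr ⟨l, rfl⟩, h2⟩

-- B's tokenizer fold computes "some token (with tok prefixed onto the head token) is poor"
theorem pvTokFold_invariant (cs : List Char) (found : Bool) (tok : List Char) :
    ((cs.foldl
        (fun (st : Bool × List Char) ch =>
          if ch = ' ' then (st.1 || pvPoorTokens.contains st.2, [])
          else (st.1, st.2 ++ [ch])) (found, tok)).1
      || pvPoorTokens.contains (cs.foldl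
        (fun (st : Bool × List Char) ch =>
          if ch = ' ' then (st.1 || pvPoorTokens.contains st.2, [])
          else (st.1, st.2 ++ [ch])) (found, tok)).2)
    = (found || pvPoorTokens.contains (tok ++ (pvHT cs).1)
        || (pvHT cs).2.any (fun t => pvPoorTokens.contains t)) := by
  induction cs generalizing found tok with
  | nil => simp [pvHT]
  | cons c t ih =>
    by_cases hc : c = ' '
    · simp only [List.foldl_cons, hc, if_pos rfl]
      rw [ih]
      simp [pvHT, Bool.or_assoc, Bool.or_comm, Bool.or_left_comm]
    · simp only [List.foldl_cons, if_neg hc]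
      rw [ih]
      simp [pvHT, hc, List.append_assoc]

theorem pvNaming_eq (code : String) :
    ((["x", "y", "a", "b", "foo", "bar"] : List String).any
      (fun name => PySem.Str.isIn (" " ++ name ++ " ") (" " ++ code ++ " ")))
    = pvPoorTokenFound code := by
  have hB : pvPoorTokenFound code
      = (pvPoorTokens.contains (pvHT code.toList).1
         || (pvHT code.toList).2.any (fun t => pvPoorTokens.contains t)) := by
    simp only [pvPoorTokenFound]
    rw [pvTokFold_invariant code.toList false []]
    simp only [Bool.false_or, List.nil_append]
  have key : ∀ w : List Char, w ≠ [] → ' ' ∉ w →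
      ∀ name : String, name.toList = w →
      PySem.Str.isIn (" " ++ name ++ " ") (" " ++ code ++ " ")
        = ((pvHT code.toList).1 :: (pvHT code.toList).2).contains w := by
    intro w hw hsp name hname
    rw [Bool.eq_iff_iff]
    have htl : (" " ++ name ++ " ").toList = ' ' :: w ++ [' '] := by
      simp [hname]
    have htl2 : (" " ++ code ++ " ").toList = ' ' :: code.toList ++ [' '] := by simp
    rw [PySem.Str.isIn_iff_infix, htl, htl2, pvOcc_iff_infix, pvOcc_iff_token _ _ hw hsp]
    simp [List.contains_iff_mem, List.mem_cons]
  rw [hB]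
  simp only [List.any_cons, List.any_nil,
    key ['x'] (by decide) (by decide) "x" (by decide),
    key ['y'] (by decide) (by decide) "y" (by decide),
    key ['a'] (by decide) (by decide) "a" (by decide),
    key ['b'] (by decide) (by decide) "b" (by decide),
    key ['f','o','o'] (by decide) (by decide) "foo" (by decide),
    key ['b','a','r'] (by decide) (by decide) "bar" (by decide)]
  rw [Bool.eq_iff_iff]
  simp only [Bool.or_eq_true, Bool.or_false, List.contains_iff_mem, List.any_eq_true,
    List.mem_cons, List.not_mem_nil, or_false, pvPoorTokens]
  constructor
  · rintro (h | h | h | h | h | h) <;>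
      rcases h with h | h <;>
      first
        | (left; rw [← h]; tauto)
        | (right; exact ⟨_, h, by simp⟩)
  · rintro (h | ⟨t, ht, hmem⟩)
    · rcases h with h | h | h | h | h | h <;> simp [h]
    · rcases hmem with rfl | rfl | rfl | rfl | rfl | rfl <;> tauto


/- ---------- spacing ---------- -/
def pvHasAdj : List Char → Bool
  | a :: rest =>
      ((match rest with
        | b :: _ => pvBadPair a b
        | [] => false) || pvHasAdj rest)
  | [] => false

theorem pvHasAdj_iff (cs : List Char) :
    pvHasAdj cs = true ↔ ∃ a b, pvBadPair a b = true ∧ [a, b] <:+: cs := by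
  induction cs with
  | nil => simp [pvHasAdj]
  | cons c rest ih =>
    rcases rest with _ | ⟨b, t⟩
    · constructor
      · intro h
        exact absurd h (by simp [pvHasAdj])
      · rintro ⟨a, b, hq, hinf⟩
        rcases List.infix_cons_iff.mp hinf with hpre | hinf'
        · have := hpre.length_le; simp at this
        · exact absurd hinf' (by simp)
    · rw [show pvHasAdj (c :: b :: t) = (pvBadPair c b || pvHasAdj (b :: t)) from by
        simp [pvHasAdj]]
      simp only [Bool.or_eq_true, ih]
      constructor
      · rintro (hq | ⟨a', b', hq, hinf⟩)
        · exact ⟨c, b, hq, ⟨[], t, by simp⟩⟩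
        · exact ⟨a', b', hq, hinf.trans (List.infix_cons (List.infix_refl _))⟩
      · rintro ⟨a', b', hq, hinf⟩
        rcases List.infix_cons_iff.mp hinf with hpre | hinf'
        · obtain ⟨rfl, hpre'⟩ := List.cons_prefix_cons.mp hpre
          obtain ⟨rfl, -⟩ := List.cons_prefix_cons.mp hpre'
          exact Or.inl hq
        · exact Or.inr ⟨a', b', hq, hinf'⟩

theorem pvPairFold_invariant (cs : List Char) (found : Bool) (prev : Option Char) :
    (cs.foldl
      (fun (st : Bool × Option Char) ch =>
        ((match st.2 with
          | some p => st.1 || pvBadPair p ch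
          | none => st.1), some ch)) (found, prev)).1
    = (found || (match prev with
        | some p => pvHasAdj (p :: cs)
        | none => pvHasAdj cs)) := by
  induction cs generalizing found prev with
  | nil => cases prev <;> simp [pvHasAdj]
  | cons c t ih =>
    cases prev with
    | none => simp only [List.foldl_cons]; rw [ih]
    | some p =>
      simp only [List.foldl_cons]
      rw [ih]
      simp [pvHasAdj, Bool.or_assoc]

theorem pvSpacing_eq (code : String) :
    ((["=+", "=-", "=*", "=/", "><", "<>", "==+", "==-"] : List String).any
      (fun pattern => PySem.Str.isIn pattern code))
    = pvBadPairFound code := by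
  rw [pvBadPairFound, pvPairFold_invariant code.toList false none]
  rw [Bool.eq_iff_iff]
  simp only [Bool.false_or, List.any_cons, List.any_nil, Bool.or_eq_true, Bool.or_false,
    PySem.Str.isIn_iff_infix, pvHasAdj_iff,
    show ("=+" : String).toList = ['=','+'] from by decide,
    show ("=-" : String).toList = ['=','-'] from by decide,
    show ("=*" : String).toList = ['=','*'] from by decide,
    show ("=/" : String).toList = ['=','/'] from by decide,
    show ("><" : String).toList = ['>','<'] from by decide,
    show ("<>" : String).toList = ['<','>'] from by decide,
    show ("==+" : String).toList = ['=','=','+'] from by decide,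
    show ("==-" : String).toList = ['=','=','-'] from by decide]
  constructor
  · rintro (h | h | h | h | h | h | h | h)
    · exact ⟨'=', '+', by decide, h⟩
    · exact ⟨'=', '-', by decide, h⟩
    · exact ⟨'=', '*', by decide, h⟩
    · exact ⟨'=', '/', by decide, h⟩
    · exact ⟨'>', '<', by decide, h⟩
    · exact ⟨'<', '>', by decide, h⟩
    · exact ⟨'=', '+', by decide, List.IsInfix.trans (l₂ := ['=','=','+']) ⟨['='], [], by simp⟩ h⟩
    · exact ⟨'=', '-', by decide, List.IsInfix.trans (l₂ := ['=','=','-']) ⟨['='], [], by simp⟩ h⟩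
  · rintro ⟨a, b, hq, hinf⟩
    simp only [pvBadPair, Bool.or_eq_true, Bool.and_eq_true, decide_eq_true_eq] at hq
    rcases hq with ((((⟨ha, hb⟩ | ⟨ha, hb⟩) | ⟨ha, hb⟩) | ⟨ha, hb⟩) | ⟨ha, hb⟩) | ⟨ha, hb⟩ <;>
      rw [ha, hb] at hinf
    · exact Or.inl hinf
    · exact Or.inr <| Or.inl hinf
    · exact Or.inr <| Or.inr <| Or.inl hinf
    · exact Or.inr <| Or.inr <| Or.inr <| Or.inl hinf
    · exact Or.inr <| Or.inr <| Or.inr <| Or.inr <| Or.inl hinf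
    · exact Or.inr <| Or.inr <| Or.inr <| Or.inr <| Or.inr <| Or.inl hinf

/- ---------- counts: '#' ---------- -/
theorem pvCountGo_single (c : Char) (fuel : Nat) :
    ∀ (cs : List Char) (acc : Nat), cs.length ≤ fuel →
      PySem.Chars.count.go [c] fuel cs acc = acc + cs.countP (fun x => x = c) := by
  induction fuel with
  | zero =>
    intro cs acc h
    have : cs = [] := List.eq_nil_of_length_eq_zero (Nat.le_zero.mp h)
    subst this
    rw [PySem.Chars.count.go]; simp
  | succ fuel ih =>
    intro cs acc h
    rcases cs with _ | ⟨x, t⟩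
    · rw [PySem.Chars.count.go]; simp; omega
    · rw [PySem.Chars.count.go]
      by_cases hx : x = c
      · subst hx
        simp only [List.isPrefixOf, BEq.rfl, Bool.true_and, List.isPrefixOf_nil_left, if_pos]
        rw [List.length_cons] at h
        rw [show List.drop ([x] : List Char).length (x :: t) = t by simp]
        rw [ih t (acc + 1) (by omega)]
        simp [List.countP_cons]
        omega
      · have : ([c].isPrefixOf (x :: t)) = false := by
          simp [List.isPrefixOf]
          exact fun h' => absurd h'.symm hx
        rw [if_neg (by simp [this])]
        rw [List.length_cons] at h
        rw [ih t acc (by omega)]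
        simp [List.countP_cons, hx]

theorem pvHashFold (cs : List Char) (n : Nat) :
    cs.foldl (fun n ch => if ch = '#' then n + 1 else n) n = n + cs.countP (fun x => x = '#') := by
  induction cs generalizing n with
  | nil => simp
  | cons c t ih =>
    by_cases hc : c = '#' <;> simp [hc, ih, List.countP_cons] <;> omega

theorem pvHash_eq (code : String) :
    (PySem.Str.isIn "#" code && decide (3 ≤ PySem.Str.count code "#"))
    = decide (3 ≤ pvHashCount code) := by
  have hcount : PySem.Str.count code "#" = code.toList.countP (fun x => x = '#') := by
    rw [PySem.Str.count_eq]
    show PySem.Chars.count code.toList ['#'] = _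
    rw [PySem.Chars.count, if_neg (by simp)]
    simpa using pvCountGo_single '#' code.toList.length code.toList 0 (le_refl _)
  have hhc : pvHashCount code = code.toList.countP (fun x => x = '#') := by
    rw [pvHashCount, pvHashFold]
    omega
  rw [Bool.eq_iff_iff]
  simp only [Bool.and_eq_true, decide_eq_true_eq, hcount, hhc]
  constructor
  · rintro ⟨-, h⟩; exact h
  · intro h
    refine ⟨?_, h⟩
    rw [PySem.Str.isIn_iff_infix]
    rw [show ("#" : String).toList = ['#'] from by decide]
    rw [List.singleton_infix_iff]
    have hpos : 0 < code.toList.countP (fun x => decide (x = '#')) := by omega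
    obtain ⟨x, hx, hx2⟩ := List.countP_pos_iff.mp hpos
    have hx3 : x = '#' := by simpa using hx2
    rw [← hx3]
    exact hx

/- ---------- counts: "\n\n" via run lengths ---------- -/
def pvNN2 : List Char → Nat
  | [] => 0
  | [_] => 0
  | a :: b :: t => if a = '\n' ∧ b = '\n' then pvNN2 t + 1 else pvNN2 (b :: t)
termination_by cs => cs.length

theorem pvNN2_cons_ne (c : Char) (t : List Char) (hc : c ≠ '\n') :
    pvNN2 (c :: t) = pvNN2 t := by
  rcases t with _ | ⟨b, t'⟩
  · simp [pvNN2]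
  · rw [pvNN2]
    simp [hc]

theorem pvCountGo_nn (fuel : Nat) :
    ∀ (cs : List Char) (acc : Nat), cs.length ≤ fuel →
      PySem.Chars.count.go ['\n', '\n'] fuel cs acc = acc + pvNN2 cs := by
  induction fuel with
  | zero =>
    intro cs acc h
    have : cs = [] := List.eq_nil_of_length_eq_zero (Nat.le_zero.mp h)
    subst this
    rw [PySem.Chars.count.go]; simp [pvNN2]
  | succ fuel ih =>
    intro cs acc h
    rcases cs with _ | ⟨x, t⟩
    · rw [PySem.Chars.count.go]; simp [pvNN2]; omega
    · rw [PySem.Chars.count.go]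
      rcases t with _ | ⟨b, t'⟩
      · have : (['\n', '\n'].isPrefixOf [x]) = false := by simp [List.isPrefixOf]
        rw [if_neg (by simp [this])]
        rw [ih [] acc (by simp)]
        rcases Decidable.em (x = '\n') with hx | hx
        · simp [pvNN2]
        · simp [pvNN2]
      · by_cases hp : x = '\n' ∧ b = '\n'
        · obtain ⟨rfl, rfl⟩ := hp
          simp only [List.isPrefixOf, BEq.rfl, Bool.true_and, List.isPrefixOf_nil_left, if_pos]
          simp only [List.length_cons] at h
          rw [show List.drop ['\n','\n'].length ('\n' :: '\n' :: t') = t' by simp]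
          rw [ih t' (acc + 1) (by omega)]
          rw [pvNN2]
          simp
          omega
        · have : (['\n', '\n'].isPrefixOf (x :: b :: t')) = false := by
            simp only [List.isPrefixOf, Bool.and_eq_false_iff]
            rcases Decidable.em (x = '\n') with hx | hx
            · have hb : b ≠ '\n' := fun hb => hp ⟨hx, hb⟩
              right
              simp [List.isPrefixOf, hb]
              intro h'; exact absurd h'.symm hb
            · left; simp; intro h'; exact absurd h'.symm hx
          rw [if_neg (by simp [this])]
          simp only [List.length_cons] at h
          rw [ih (b :: t') acc (by simp; omega)]
          rw [pvNN2, if_neg hp]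

theorem pvNN2_replicate (r : Nat) : pvNN2 (List.replicate r '\n') = r / 2 := by
  induction r using Nat.strong_induction_on with
  | _ r ih =>
    match r with
    | 0 => simp [pvNN2]
    | 1 => simp [pvNN2, List.replicate]
    | (n + 2) =>
      rw [show List.replicate (n + 2) '\n' = '\n' :: '\n' :: List.replicate n '\n' by
        simp [List.replicate]]
      rw [pvNN2, if_pos ⟨rfl, rfl⟩, ih n (by omega)]
      omega

theorem pvNN2_replicate_append (r : Nat) (c : Char) (t : List Char) (hc : c ≠ '\n') :
    pvNN2 (List.replicate r '\n' ++ c :: t) = r / 2 + pvNN2 t := by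
  induction r using Nat.strong_induction_on with
  | _ r ih =>
    match r with
    | 0 => simpa using pvNN2_cons_ne c t hc
    | 1 =>
      simp only [List.replicate, List.nil_append, List.cons_append]
      rw [pvNN2, if_neg (by rintro ⟨-, h⟩; exact hc h)]
      simpa using pvNN2_cons_ne c t hc
    | (n + 2) =>
      rw [show List.replicate (n + 2) '\n' ++ c :: t
            = '\n' :: '\n' :: (List.replicate n '\n' ++ c :: t) by simp [List.replicate]]
      rw [pvNN2, if_pos ⟨rfl, rfl⟩, ih n (by omega)]
      omega

theorem pvNNFold_invariant (cs : List Char) (total run : Nat) :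
    ((cs.foldl
        (fun (st : Nat × Nat) ch =>
          if ch = '\n' then (st.1, st.2 + 1) else (st.1 + st.2 / 2, 0)) (total, run)).1
      + (cs.foldl
        (fun (st : Nat × Nat) ch =>
          if ch = '\n' then (st.1, st.2 + 1) else (st.1 + st.2 / 2, 0)) (total, run)).2 / 2)
    = total + pvNN2 (List.replicate run '\n' ++ cs) := by
  induction cs generalizing total run with
  | nil => simpa using (pvNN2_replicate run).symm
  | cons c t ih =>
    by_cases hc : c = '\n'
    · subst hc
      simp only [List.foldl_cons, reduceIte]
      rw [ih]
      congr 1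
      rw [show List.replicate run '\n' ++ '\n' :: t = List.replicate (run + 1) '\n' ++ t by
        rw [List.replicate_succ']; simp]
    · simp only [List.foldl_cons, if_neg hc]
      rw [ih]
      simp only [List.replicate, List.nil_append]
      rw [pvNN2_replicate_append run c t hc]
      omega

theorem pvOrg_eq (code : String) :
    (decide (2 ≤ PySem.Str.count code "\n\n")) = decide (2 ≤ pvBlankSepCount code) := by
  have hcount : PySem.Str.count code "\n\n" = pvNN2 code.toList := by
    rw [PySem.Str.count_eq]
    show PySem.Chars.count code.toList ['\n','\n'] = _
    rw [PySem.Chars.count, if_neg (by simp)]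
    simpa using pvCountGo_nn code.toList.length code.toList 0 (le_refl _)
  have hbs : pvBlankSepCount code = pvNN2 code.toList := by
    rw [pvBlankSepCount]
    have := pvNNFold_invariant code.toList 0 0
    simpa using this
  rw [hcount, hbs]

-- ===== VERDICT (by name: the statement is the Claim_ definition above) =====
theorem check_code_quality_spec : Claim_equal_check_code_quality := by
  intro code_input _
  unfold Spec_check_code_quality
  simp only [check_code_quality, check_code_quality_alt]
  rw [pvNaming_eq code_input, pvSpacing_eq code_input, pvHash_eq code_input, pvOrg_eq code_input]
  generalize pvPoorTokenFound code_input = b1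
  generalize pvBadPairFound code_input = b2
  generalize (decide (3 ≤ pvHashCount code_input)) = b3
  generalize (decide (2 ≤ pvBlankSepCount code_input)) = b4
  cases b1 <;> cases b2 <;> cases b3 <;> cases b4 <;> decide
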